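-- pv_equiv track=rewrite | github.com/vidagy/aoc | aoc/year_2022/task_09.py | get_head_path
-- ===== SOURCE A (Python) =====
-- DIR_DIFF_MAP = {
--     "L": (-1, 0),
--     "R": (1, 0),
--     "U": (0, 1),
--     "D": (0, -1),
-- }
--
-- def get_head_path(steps: list[tuple[str, int]]) -> list[tuple[int, int]]:
--     current_pos = (0, 0)
--     path = [current_pos]
--
--     for step in steps:
--         direction, count = step
--         for i in range(count):
--             current_pos = (
--                 current_pos[0] + DIR_DIFF_MAP[direction][0],
--                 current_pos[1] + DIR_DIFF_MAP[direction][1],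
--             )
--             path.append(current_pos)
--     return path
-- ===== SOURCE B (Python) =====
-- DIR_DIFF_MAP = {
--     "L": (-1, 0),
--     "R": (1, 0),
--     "U": (0, 1),
--     "D": (0, -1),
-- }
--
-- def get_head_path(steps):
--     # per-command closed form: emit the whole segment by scaling the unit
--     # vector, then jump the anchor by count * delta (no per-unit accumulation)
--     x = y = 0
--     path = [(0, 0)]
--     for d, c in steps:
--         if c <= 0:
--             continue
--         dx, dy = DIR_DIFF_MAP[d]
--         path += [(x + dx * i, y + dy * i) for i in range(1, c + 1)]
--         x += dx * c
--         y += dy * c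
--     return path
-- ===== Notes on version B (the rewrite author's own statement) =====
-- stated objective: alternative
-- what changed: Replaces A's per-unit cumulative mutation of current_pos with a per-command closed form: each command emits its whole segment by scaling the unit vector (anchor + delta*i) and the anchor jumps by count*delta once per command.
import Mathlib
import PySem

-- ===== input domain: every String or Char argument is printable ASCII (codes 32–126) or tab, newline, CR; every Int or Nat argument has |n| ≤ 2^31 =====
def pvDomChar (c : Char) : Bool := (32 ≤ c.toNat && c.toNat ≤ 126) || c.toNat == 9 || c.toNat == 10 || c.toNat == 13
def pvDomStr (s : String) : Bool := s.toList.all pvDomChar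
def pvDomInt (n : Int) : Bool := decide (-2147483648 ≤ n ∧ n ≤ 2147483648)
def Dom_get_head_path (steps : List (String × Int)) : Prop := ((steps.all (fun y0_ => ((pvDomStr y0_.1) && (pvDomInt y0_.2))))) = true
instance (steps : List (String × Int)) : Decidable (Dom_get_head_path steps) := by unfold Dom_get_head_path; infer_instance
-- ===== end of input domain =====

-- B replaces A's per-unit cumulative mutation with a per-command closed form (segment by scaling + one anchor jump); return values proved equal on Pre_.

-- ===== PORT A =====
def DIR_DIFF_MAP : PySem.Dict String (Int × Int) :=
  PySem.Dict.ofList [("L", (-1, 0)), ("R", (1, 0)), ("U", (0, 1)), ("D", (0, -1))]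

-- A's fused nested loop; the dict lookup uses getD (0,0): Python raises KeyError
-- there, and exactly those inputs are excluded by Pre_.
def get_head_path (steps : List (String × Int)) : List (Int × Int) :=
  (steps.foldl
    (fun (st : (Int × Int) × List (Int × Int)) step =>
      (PySem.List.pyRange 0 step.2 1).foldl
        (fun st _ =>
          let d := PySem.Dict.getD DIR_DIFF_MAP step.1 (0, 0)
          let cur := (st.1.1 + d.1, st.1.2 + d.2)
          (cur, st.2 ++ [cur])) st)
    ((0, 0), [((0, 0) : Int × Int)])).2

-- ===== PORT B =====
-- per command: skip non-positive counts, emit the segment by scaling the unit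
-- vector (anchor + delta * i for i in 1..c), jump the anchor by c * delta once.
def get_head_path_alt (steps : List (String × Int)) : List (Int × Int) :=
  (steps.foldl
    (fun (st : Int × Int × List (Int × Int)) p =>
      if p.2 ≤ 0 then st
      else
        let d := PySem.Dict.getD DIR_DIFF_MAP p.1 (0, 0)
        (st.1 + d.1 * p.2, st.2.1 + d.2 * p.2,
         st.2.2 ++ (PySem.List.pyRange 1 (p.2 + 1) 1).map
           (fun i => (st.1 + d.1 * i, st.2.1 + d.2 * i))))
    (0, 0, [((0, 0) : Int × Int)])).2.2

-- ===== PRECONDITION & SPEC =====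
-- Pre_ excludes exactly the inputs on which Python A raises KeyError:
-- a step with positive count whose direction is not a key of DIR_DIFF_MAP.
def Pre_get_head_path (steps : List (String × Int)) : Prop :=
  ∀ p ∈ steps, 0 < p.2 → (p.1 = "L" ∨ p.1 = "R" ∨ p.1 = "U" ∨ p.1 = "D")
instance (steps : List (String × Int)) : Decidable (Pre_get_head_path steps) := by
  unfold Pre_get_head_path; infer_instance

def pvWitness_get_head_path : (List (String × Int)) := [("R", 2), ("U", 1), ("X", -3)]

def Spec_get_head_path (steps : List (String × Int)) (out : List (Int × Int)) : Prop := out = get_head_path_alt steps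
instance (steps : List (String × Int)) (out : List (Int × Int)) : Decidable (Spec_get_head_path steps out) := by unfold Spec_get_head_path; infer_instance

-- ===== CLAIM =====
def Claim_equal_get_head_path : Prop := ∀ (steps : List (String × Int)), Dom_get_head_path steps → Pre_get_head_path steps → Spec_get_head_path steps (get_head_path steps)

-- ===== LEMMAS AND PROOFS =====

-- A's inner per-unit loop over n steps, in closed form: final position jumps by
-- n·delta and the appended segment is the scaled points start + delta·(k+1).
theorem pv_seg (n : Nat) (dx dy x y : Int) (acc : List (Int × Int)) :
    (List.range n).foldl
      (fun (st : (Int × Int) × List (Int × Int)) _ =>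
        ((st.1.1 + dx, st.1.2 + dy), st.2 ++ [(st.1.1 + dx, st.1.2 + dy)]))
      ((x, y), acc)
    = ((x + dx * n, y + dy * n),
       acc ++ (List.range n).map (fun (k : Nat) => (x + dx * ((k : Int) + 1), y + dy * ((k : Int) + 1)))) := by
  induction n with
  | zero => simp
  | succ n ih =>
    rw [List.range_succ, List.foldl_append, ih, List.map_append]
    simp only [List.foldl_cons, List.foldl_nil, List.map_cons, List.map_nil, List.append_assoc,
      Prod.mk.injEq]
    refine ⟨⟨by push_cast; ring, by push_cast; ring⟩, ?_⟩
    congr 3 <;> push_cast <;> ring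

-- The two folds keep related states: A's ((x,y),path) tracks B's (x,y,path).
theorem pv_states (steps : List (String × Int)) (x y : Int) (acc : List (Int × Int)) :
    steps.foldl
      (fun (st : (Int × Int) × List (Int × Int)) step =>
        (PySem.List.pyRange 0 step.2 1).foldl
          (fun st _ =>
            let d := PySem.Dict.getD DIR_DIFF_MAP step.1 (0, 0)
            let cur := (st.1.1 + d.1, st.1.2 + d.2)
            (cur, st.2 ++ [cur])) st)
      ((x, y), acc)
    = (let r := steps.foldl
        (fun (st : Int × Int × List (Int × Int)) p =>
          if p.2 ≤ 0 then st
          else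
            let d := PySem.Dict.getD DIR_DIFF_MAP p.1 (0, 0)
            (st.1 + d.1 * p.2, st.2.1 + d.2 * p.2,
             st.2.2 ++ (PySem.List.pyRange 1 (p.2 + 1) 1).map
               (fun i => (st.1 + d.1 * i, st.2.1 + d.2 * i))))
        (x, y, acc);
       ((r.1, r.2.1), r.2.2)) := by
  induction steps generalizing x y acc with
  | nil => simp
  | cons s ss ih =>
    simp only [List.foldl_cons]
    by_cases hc : s.2 ≤ 0
    · rw [PySem.List.pyRange_one_eq_nil hc]
      simp only [List.foldl_nil, if_pos hc]
      exact ih x y acc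
    · push_neg at hc
      rw [if_neg (not_le.mpr hc)]
      rw [PySem.List.pyRange_one (0 : Int) s.2]
      rw [List.foldl_map]
      have := pv_seg (s.2 - 0).toNat (PySem.Dict.getD DIR_DIFF_MAP s.1 (0, 0)).1
        (PySem.Dict.getD DIR_DIFF_MAP s.1 (0, 0)).2 x y acc
      simp only [] at this ⊢
      rw [this]
      have hcast : ((s.2 - 0).toNat : Int) = s.2 := by omega
      rw [hcast]
      rw [ih]
      -- segments equal: B's pyRange 1 (c+1) map vs A's closed-form range map
      have hseg :
          (PySem.List.pyRange 1 (s.2 + 1) 1).map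
            (fun i => (x + (PySem.Dict.getD DIR_DIFF_MAP s.1 (0, 0)).1 * i,
                       y + (PySem.Dict.getD DIR_DIFF_MAP s.1 (0, 0)).2 * i))
          = (List.range (s.2 - 0).toNat).map
              (fun (k : Nat) => (x + (PySem.Dict.getD DIR_DIFF_MAP s.1 (0, 0)).1 * ((k : Int) + 1),
                                 y + (PySem.Dict.getD DIR_DIFF_MAP s.1 (0, 0)).2 * ((k : Int) + 1))) := by
        rw [PySem.List.pyRange_one (1 : Int) (s.2 + 1)]
        have h2 : ((s.2 + 1) - 1).toNat = (s.2 - 0).toNat := by omega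
        rw [h2, List.map_map]
        refine List.map_congr_left (fun k _ => ?_)
        simp only [Function.comp_apply, Prod.mk.injEq]
        constructor <;> push_cast <;> ring
      rw [hseg]

-- ===== VERDICT =====
theorem get_head_path_spec : Claim_equal_get_head_path := by
  intro steps _ _
  unfold Spec_get_head_path get_head_path get_head_path_alt
  rw [pv_states]
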